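-- pv_equiv track=rewrite | github.com/CodingThrust/problem-reductions | docs/paper/verify-reductions/adversary_hamiltonian_path_degree_constrained_spanning_tree.py | adv_is_valid_dcst
-- ===== SOURCE A (Python) =====
-- def adv_is_valid_dcst(n: int, edges: list[tuple[int, int]], config: list[int], max_deg: int) -> bool:
--     """Check if config is a valid DCST solution."""
--     if n == 0:
--         return sum(config) == 0
--     if len(config) != len(edges):
--         return False
--
--     selected = [edges[i] for i in range(len(edges)) if config[i] == 1]
--
--     if len(selected) != n - 1:
--         return False
--
--     deg = [0] * n
--     adj = [[] for _ in range(n)]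
--     for u, v in selected:
--         deg[u] += 1
--         deg[v] += 1
--         adj[u].append(v)
--         adj[v].append(u)
--
--     if any(d > max_deg for d in deg):
--         return False
--
--     # BFS connectivity
--     visited = [False] * n
--     stack = [0]
--     visited[0] = True
--     cnt = 1
--     while stack:
--         cur = stack.pop()
--         for nxt in adj[cur]:
--             if not visited[nxt]:
--                 visited[nxt] = True
--                 cnt += 1
--                 stack.append(nxt)
--     return cnt == n
-- ===== SOURCE B (Python) =====
-- def adv_is_valid_dcst(n: int, edges: list[tuple[int, int]], config: list[int], max_deg: int) -> bool:
--     """Check if config is a valid DCST solution."""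
--     if n == 0:
--         return sum(config) == 0
--     if len(config) != len(edges):
--         return False
--
--     selected = [e for e, c in zip(edges, config) if c == 1]
--
--     if len(selected) != n - 1:
--         return False
--
--     deg = [0] * n
--     for u, v in selected:
--         deg[u] += 1
--         deg[v] += 1
--
--     if any(d > max_deg for d in deg):
--         return False
--
--     # connectivity by repeated relaxation over the edge list to a fixpoint
--     # (no adjacency lists, no stack)
--     visited = [False] * n
--     visited[0] = True
--     changed = True
--     while changed:
--         changed = False
--         for u, v in selected:
--             if visited[u] != visited[v]:
--                 visited[u] = visited[v] = True
--                 changed = True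
--     return all(visited)
-- ===== Notes on version B (the rewrite author's own statement) =====
-- stated objective: alternative
-- what changed: The adjacency-list + explicit-stack DFS connectivity check is replaced by repeated relaxation over the selected edge list to a fixpoint (no adjacency lists, no stack), and the index-based selected-edge comprehension by a zip-based one.
import Mathlib
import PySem

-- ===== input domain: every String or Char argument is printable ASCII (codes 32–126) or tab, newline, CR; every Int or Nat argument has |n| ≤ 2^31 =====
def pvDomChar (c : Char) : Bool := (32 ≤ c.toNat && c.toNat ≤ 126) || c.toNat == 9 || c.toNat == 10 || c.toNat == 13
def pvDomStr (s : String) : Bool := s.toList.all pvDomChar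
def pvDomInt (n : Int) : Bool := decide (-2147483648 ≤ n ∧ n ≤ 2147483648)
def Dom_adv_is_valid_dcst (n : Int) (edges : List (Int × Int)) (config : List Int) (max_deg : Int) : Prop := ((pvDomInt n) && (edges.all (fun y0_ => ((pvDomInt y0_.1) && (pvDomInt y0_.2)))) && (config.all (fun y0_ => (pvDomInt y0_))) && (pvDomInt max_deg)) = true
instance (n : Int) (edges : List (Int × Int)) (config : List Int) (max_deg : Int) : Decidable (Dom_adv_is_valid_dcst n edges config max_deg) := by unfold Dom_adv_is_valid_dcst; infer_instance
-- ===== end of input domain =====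

-- B replaces the adjacency-list + explicit-stack DFS connectivity check of A by repeated
-- relaxation over the selected edge list to a fixpoint, and the index-based selected-edge
-- comprehension by a zip-based one (objective: alternative algorithm, same results).

-- ===== PORT A =====
-- shared indexing helpers: Python's list[i] wraps a negative index once; these lemmas are
-- cited by the termination proofs of the loop ports below.
def wI (L : Nat) (i : Int) : Nat := (if i < 0 then i + L else i).toNat

def InR (L : Nat) (i : Int) : Prop := -(L : Int) ≤ i ∧ i < L

theorem wI_lt (L : Nat) (i : Int) (h : InR L i) : wI L i < L := by
  obtain ⟨h1, h2⟩ := h; simp only [wI]; split_ifs <;> omega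

theorem pyIdx_in (L : Nat) (i : Int) (h : InR L i) :
    PySem.List.pyIdx? L i = some (wI L i) := by
  obtain ⟨h1, h2⟩ := h
  simp only [PySem.List.pyIdx?, wI]
  split_ifs with h <;> simp_all <;> omega

theorem pyIdx_out (L : Nat) (i : Int) (h : ¬ InR L i) :
    PySem.List.pyIdx? L i = none := by
  simp only [InR, not_and_or] at h
  simp only [PySem.List.pyIdx?]
  split_ifs with hh <;> first | rfl | omega

theorem pyGetD_in {α : Type} (xs : List α) (i : Int) (d : α) (h : InR xs.length i) :
    PySem.List.pyGetD xs i d = xs.getD (wI xs.length i) d := by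
  simp only [PySem.List.pyGetD, PySem.List.pyGet?, pyIdx_in _ _ h]
  simp [List.getD_eq_getElem?_getD]

theorem pyGetD_out {α : Type} (xs : List α) (i : Int) (d : α) (h : ¬ InR xs.length i) :
    PySem.List.pyGetD xs i d = d := by
  simp [PySem.List.pyGetD, PySem.List.pyGet?, pyIdx_out _ _ h]

theorem pySetD_in {α : Type} (xs : List α) (i : Int) (v : α) (h : InR xs.length i) :
    PySem.List.pySetD xs i v = xs.set (wI xs.length i) v := by
  simp [PySem.List.pySetD, PySem.List.pySet?, pyIdx_in _ _ h]

theorem pySetD_out {α : Type} (xs : List α) (i : Int) (v : α) (h : ¬ InR xs.length i) :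
    PySem.List.pySetD xs i v = xs := by
  simp [PySem.List.pySetD, PySem.List.pySet?, pyIdx_out _ _ h]

theorem count_false_set (v : List Bool) (i : Nat) (hi : i < v.length) (hf : v[i] = false) :
    (v.set i true).count false + 1 = v.count false := by
  have hmem : false ∈ v := hf ▸ v.getElem_mem hi
  have hpos : 0 < v.count false := List.count_pos_iff.2 hmem
  rw [List.count_set hi]
  simp [hf]
  omega

-- selected = [edges[i] for i in range(len(edges)) if config[i] == 1]
def pvSelA (edges : List (Int × Int)) (config : List Int) : List (Int × Int) :=
  ((PySem.List.pyRange 0 (PySem.List.len edges) 1).filter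
      (fun i => PySem.List.pyGetD config i 0 == 1)).map
    (fun i => PySem.List.pyGetD edges i ((0 : Int), (0 : Int)))

-- loop body: deg[u] += 1; deg[v] += 1; adj[u].append(v); adj[v].append(u)
def pvDegAdjStep (da : List Int × List (List Int)) (uv : Int × Int) : List Int × List (List Int) :=
  let deg1 := PySem.List.pySetD da.1 uv.1 (PySem.List.pyGetD da.1 uv.1 0 + 1)
  let deg2 := PySem.List.pySetD deg1 uv.2 (PySem.List.pyGetD deg1 uv.2 0 + 1)
  let adj1 := PySem.List.pySetD da.2 uv.1 (PySem.List.pyGetD da.2 uv.1 [] ++ [uv.2])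
  let adj2 := PySem.List.pySetD adj1 uv.2 (PySem.List.pyGetD adj1 uv.2 [] ++ [uv.1])
  (deg2, adj2)

def pvDegAdj (n : Nat) (sel : List (Int × Int)) : List Int × List (List Int) :=
  sel.foldl pvDegAdjStep (List.replicate n 0, List.replicate n [])

theorem pvDegAdj_adj_len (n : Nat) (sel : List (Int × Int)) : (pvDegAdj n sel).2.length = n := by
  suffices h : ∀ (l : List (Int × Int)) (da : List Int × List (List Int)),
      (l.foldl pvDegAdjStep da).2.length = da.2.length by
    simpa [pvDegAdj] using h sel (List.replicate n 0, List.replicate n [])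
  intro l
  induction l with
  | nil => intro da; rfl
  | cons uv t ih =>
    intro da
    rw [List.foldl_cons, ih]
    simp [pvDegAdjStep, PySem.List.length_pySetD]

-- inner DFS loop: for nxt in adj[cur]: if not visited[nxt]: visit, count, push
-- (the Lean stack is Python's stack reversed: push = cons, stack.pop() = head)
def pvDfsInner (nbrs : List Int) (st : List Bool × List Int × Int) : List Bool × List Int × Int :=
  nbrs.foldl (fun st nxt =>
      if PySem.List.pyGetD st.1 nxt false then st
      else (PySem.List.pySetD st.1 nxt true, nxt :: st.2.1, st.2.2 + 1)) st

theorem pvDfsInner_len (nbrs : List Int) (st : List Bool × List Int × Int) :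
    (pvDfsInner nbrs st).1.length = st.1.length := by
  induction nbrs generalizing st with
  | nil => rfl
  | cons w t ih =>
    obtain ⟨v, s, c⟩ := st
    simp only [pvDfsInner, List.foldl_cons] at *
    split_ifs <;> rw [ih] <;> simp [PySem.List.length_pySetD]

-- termination measure for the DFS loop
def pvAdjMax (adj : List (List Int)) : Nat := (adj.map List.length).foldl max 0

def pvStackCost (adj : List (List Int)) (s : List Int) : Nat :=
  (s.map (fun x => 1 + (PySem.List.pyGetD adj x ([] : List Int)).length)).sum

def pvDfsMu (adj : List (List Int)) (st : List Bool × List Int × Int) : Nat :=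
  pvStackCost adj st.2.1 + st.1.count false * (2 * (1 + pvAdjMax adj))

theorem pyGetD_adj_le (adj : List (List Int)) (x : Int) :
    (PySem.List.pyGetD adj x ([] : List Int)).length ≤ pvAdjMax adj := by
  by_cases h : InR adj.length x
  · rw [pyGetD_in _ _ _ h]
    have hlt := wI_lt adj.length x h
    rw [List.getD_eq_getElem _ _ hlt]
    exact (PySem.List.le_foldl_max (adj.map List.length) 0).2 _
      (List.mem_map.2 ⟨adj[wI adj.length x], adj.getElem_mem hlt, rfl⟩)
  · rw [pyGetD_out _ _ _ h]; exact Nat.zero_le _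

theorem pvDfsInner_mu (adj : List (List Int)) (nbrs : List Int) (v : List Bool)
    (s : List Int) (c : Int) (hv : v.length = adj.length) :
    pvDfsMu adj (pvDfsInner nbrs (v, s, c)) ≤ pvDfsMu adj (v, s, c) + nbrs.length := by
  induction nbrs generalizing v s c with
  | nil => simp [pvDfsInner]
  | cons w t ih =>
    simp only [pvDfsInner, List.foldl_cons]
    split_ifs with hg
    · exact le_trans (ih v s c hv) (by simp)
    · by_cases hin : InR v.length w
      · -- in-range push: a fresh vertex is marked, paying for the stack entry
        have hlt := wI_lt v.length w hin
        have hfalse : v[wI v.length w] = false := by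
          have := pyGetD_in v w false hin
          rw [List.getD_eq_getElem _ _ hlt] at this
          simp only [this] at hg; simpa using hg
        rw [pySetD_in _ _ _ hin]
        have hcnt := count_false_set v (wI v.length w) hlt hfalse
        have hle := pyGetD_adj_le adj w
        have h1 := ih (v.set (wI v.length w) true) (w :: s) (c + 1) (by simp [hv])
        have e1 : pvDfsMu adj (v.set (wI v.length w) true, w :: s, c + 1)
            = pvStackCost adj s + (1 + (PySem.List.pyGetD adj w ([] : List Int)).length)
              + (v.set (wI v.length w) true).count false * (2 * (1 + pvAdjMax adj)) := by
          simp [pvDfsMu, pvStackCost]; ring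
        have e2 : pvDfsMu adj (v, s, c)
            = pvStackCost adj s + v.count false * (2 * (1 + pvAdjMax adj)) := rfl
        have e3 : v.count false * (2 * (1 + pvAdjMax adj))
            = (v.set (wI v.length w) true).count false * (2 * (1 + pvAdjMax adj))
              + (2 * (1 + pvAdjMax adj)) := by
          rw [← hcnt]; ring
        refine le_trans h1 ?_
        rw [e1, e2, e3]
        simp only [List.length_cons]
        omega
      · -- out-of-range push: the pushed entry has an empty neighbour list
        rw [pySetD_out _ _ _ hin]
        have h1 := ih v (w :: s) (c + 1) hv
        have hout : PySem.List.pyGetD adj w ([] : List Int) = [] := by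
          apply pyGetD_out; rw [← hv]; exact hin
        have e1 : pvDfsMu adj (v, w :: s, c + 1) = pvDfsMu adj (v, s, c) + 1 := by
          simp [pvDfsMu, pvStackCost, hout]; ring
        rw [e1] at h1
        exact le_trans h1 (by simp only [List.length_cons]; omega)

-- while stack: cur = stack.pop(); inner loop.  The length hypothesis only makes the
-- recursion's measure argument go through; it is invariant along the loop.
def pvDfs (adj : List (List Int)) (v : List Bool) (s : List Int) (c : Int)
    (hv : v.length = adj.length) : List Bool × Int :=
  match s with
  | [] => (v, c)
  | cur :: rest =>
      pvDfs adj (pvDfsInner (PySem.List.pyGetD adj cur []) (v, rest, c)).1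
        (pvDfsInner (PySem.List.pyGetD adj cur []) (v, rest, c)).2.1
        (pvDfsInner (PySem.List.pyGetD adj cur []) (v, rest, c)).2.2
        (by rw [pvDfsInner_len]; exact hv)
  termination_by pvDfsMu adj (v, s, c)
  decreasing_by
    have h1 := pvDfsInner_mu adj (PySem.List.pyGetD adj cur []) v rest c hv
    have h2 : pvDfsMu adj (v, cur :: rest, c)
        = pvDfsMu adj (v, rest, c) + (1 + (PySem.List.pyGetD adj cur ([] : List Int)).length) := by
      simp [pvDfsMu, pvStackCost]; ring
    have h3 : pvDfsMu adj ((pvDfsInner (PySem.List.pyGetD adj cur []) (v, rest, c)).1,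
        (pvDfsInner (PySem.List.pyGetD adj cur []) (v, rest, c)).2.1,
        (pvDfsInner (PySem.List.pyGetD adj cur []) (v, rest, c)).2.2)
        = pvDfsMu adj (pvDfsInner (PySem.List.pyGetD adj cur []) (v, rest, c)) := rfl
    omega

def adv_is_valid_dcst (n : Int) (edges : List (Int × Int)) (config : List Int) (max_deg : Int) : Bool :=
  if n == 0 then config.sum == 0
  else if PySem.List.len config != PySem.List.len edges then false
  else if PySem.List.len (pvSelA edges config) != n - 1 then false
  else if (pvDegAdj n.toNat (pvSelA edges config)).1.any (fun d => decide (d > max_deg)) then false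
  else
    (pvDfs (pvDegAdj n.toNat (pvSelA edges config)).2
        (PySem.List.pySetD (List.replicate n.toNat false) 0 true) [0] 1
        (by rw [PySem.List.length_pySetD, List.length_replicate, pvDegAdj_adj_len])).2 == n

-- ===== PORT B =====
-- selected = [e for e, c in zip(edges, config) if c == 1]
def pvSelB (edges : List (Int × Int)) (config : List Int) : List (Int × Int) :=
  ((edges.zip config).filter (fun ec => ec.2 == 1)).map Prod.fst

def pvDegStep (deg : List Int) (uv : Int × Int) : List Int :=
  let d1 := PySem.List.pySetD deg uv.1 (PySem.List.pyGetD deg uv.1 0 + 1)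
  PySem.List.pySetD d1 uv.2 (PySem.List.pyGetD d1 uv.2 0 + 1)

def pvDeg (n : Nat) (sel : List (Int × Int)) : List Int :=
  sel.foldl pvDegStep (List.replicate n 0)

-- one pass of the while body: changed = False; for u, v in selected: relax the edge
def pvPass (sel : List (Int × Int)) (v : List Bool) : List Bool × Bool :=
  sel.foldl (fun vc uv =>
      if PySem.List.pyGetD vc.1 uv.1 false != PySem.List.pyGetD vc.1 uv.2 false then
        (PySem.List.pySetD (PySem.List.pySetD vc.1 uv.1 true) uv.2 true, true)
      else vc)
    (v, false)

-- while changed: …  The count-decrease conjunct of the guard is only a totality guard: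
-- whenever every selected endpoint is a valid index (all inputs admitted by Pre_ below),
-- it is implied by (pvPass sel v).2 = true (lemma pvPass_strict below the claim block).
def pvRelax (sel : List (Int × Int)) (v : List Bool) : List Bool :=
  if h : (pvPass sel v).2 = true ∧ (pvPass sel v).1.count false < v.count false then
    pvRelax sel (pvPass sel v).1
  else (pvPass sel v).1
  termination_by v.count false
  decreasing_by exact h.2

def adv_is_valid_dcst_alt (n : Int) (edges : List (Int × Int)) (config : List Int) (max_deg : Int) : Bool :=
  if n == 0 then config.sum == 0
  else if PySem.List.len config != PySem.List.len edges then false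
  else if PySem.List.len (pvSelB edges config) != n - 1 then false
  else if (pvDeg n.toNat (pvSelB edges config)).any (fun d => decide (d > max_deg)) then false
  else
    (pvRelax (pvSelB edges config)
        (PySem.List.pySetD (List.replicate n.toNat false) 0 true)).all (fun b => b)

-- ===== PRECONDITION & SPEC =====
-- Pre_ excludes exactly the inputs on which A raises IndexError: those whose guards all pass
-- but where some selected edge endpoint is outside [-n, n) when the degree loop reaches it.
def Pre_adv_is_valid_dcst (n : Int) (edges : List (Int × Int)) (config : List Int) (max_deg : Int) : Prop :=
  (n = 0 ∨ config.length ≠ edges.length ∨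
      (((edges.zip config).countP (fun ec => ec.2 == 1) : Int) ≠ n - 1)) ∨
  (∀ uv ∈ edges.zip config, uv.2 = 1 →
      (-n ≤ uv.1.1 ∧ uv.1.1 < n ∧ -n ≤ uv.1.2 ∧ uv.1.2 < n))

instance (n : Int) (edges : List (Int × Int)) (config : List Int) (max_deg : Int) :
    Decidable (Pre_adv_is_valid_dcst n edges config max_deg) := by
  unfold Pre_adv_is_valid_dcst; infer_instance

def pvWitness_adv_is_valid_dcst : Int × (List (Int × Int)) × List Int × Int :=
  (3, [(0, 1), (1, 2), (0, 2)], [1, 1, 0], 2)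

def Spec_adv_is_valid_dcst (n : Int) (edges : List (Int × Int)) (config : List Int) (max_deg : Int) (out : Bool) : Prop := out = adv_is_valid_dcst_alt n edges config max_deg
instance (n : Int) (edges : List (Int × Int)) (config : List Int) (max_deg : Int) (out : Bool) : Decidable (Spec_adv_is_valid_dcst n edges config max_deg out) := by unfold Spec_adv_is_valid_dcst; infer_instance

-- ===== CLAIM (what is proved, stated in full; the proofs are below) =====
def Claim_equal_adv_is_valid_dcst : Prop := ∀ (n : Int) (edges : List (Int × Int)) (config : List Int) (max_deg : Int), Dom_adv_is_valid_dcst n edges config max_deg → Pre_adv_is_valid_dcst n edges config max_deg → Spec_adv_is_valid_dcst n edges config max_deg (adv_is_valid_dcst n edges config max_deg)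

-- ===== LEMMAS AND PROOFS =====

theorem count_false_set_le (v : List Bool) (i : Nat) :
    (v.set i true).count false ≤ v.count false := by
  by_cases hi : i < v.length
  · rw [List.count_set hi]; split_ifs <;> simp_all <;> omega
  · rw [List.set_eq_of_length_le (by omega)]

theorem count_true_set (v : List Bool) (i : Nat) (hi : i < v.length) (hf : v[i] = false) :
    (v.set i true).count true = v.count true + 1 := by
  rw [List.count_set hi]; simp [hf]

-- ---------- graph notions ----------
def pvStep (sel : List (Int × Int)) (N : Nat) (a b : Nat) : Prop :=
  ∃ uv ∈ sel, (wI N uv.1 = a ∧ wI N uv.2 = b) ∨ (wI N uv.1 = b ∧ wI N uv.2 = a)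

def pvReach (sel : List (Int × Int)) (N : Nat) (a : Nat) : Prop :=
  Relation.ReflTransGen (pvStep sel N) 0 a

def pvMk (v : List Bool) (a : Nat) : Prop := v.getD a false = true

theorem pvMk_set_iff (v : List Bool) (i a : Nat) (hi : i < v.length) :
    pvMk (v.set i true) a ↔ a = i ∨ pvMk v a := by
  simp only [pvMk, List.getD_eq_getElem?_getD, List.getElem?_set]
  by_cases h : i = a
  · subst h; simp [hi]
  · simp only [if_neg h]
    constructor
    · exact fun hh => Or.inr hh
    · rintro (hh | hh)
      · exact absurd hh.symm h
      · exact hh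

theorem pvMk_set_mono (v : List Bool) (i a : Nat) (h : pvMk v a) : pvMk (v.set i true) a := by
  by_cases hi : i < v.length
  · exact (pvMk_set_iff v i a hi).2 (Or.inr h)
  · rwa [List.set_eq_of_length_le (by omega)]

theorem pvMk_set_self (v : List Bool) (i : Nat) (hi : i < v.length) : pvMk (v.set i true) i :=
  (pvMk_set_iff v i i hi).2 (Or.inl rfl)

theorem pvMk_lt (v : List Bool) (a : Nat) (h : pvMk v a) : a < v.length := by
  by_contra hc
  simp [pvMk, List.getD_eq_getElem?_getD, List.getElem?_eq_none (by omega : v.length ≤ a)] at h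

theorem pvMk_pySetD_mono (v : List Bool) (i : Int) (a : Nat) (h : pvMk v a) :
    pvMk (PySem.List.pySetD v i true) a := by
  by_cases hin : InR v.length i
  · rw [pySetD_in _ _ _ hin]; exact pvMk_set_mono _ _ _ h
  · rwa [pySetD_out _ _ _ hin]

theorem count_false_pySetD_le (v : List Bool) (i : Int) :
    (PySem.List.pySetD v i true).count false ≤ v.count false := by
  by_cases hin : InR v.length i
  · rw [pySetD_in _ _ _ hin]; exact count_false_set_le _ _
  · rw [pySetD_out _ _ _ hin]

theorem getD_set' {α : Type} (l : List α) (i : Nat) (x d : α) (hi : i < l.length) (a : Nat) :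
    (l.set i x).getD a d = if a = i then x else l.getD a d := by
  simp only [List.getD_eq_getElem?_getD, List.getElem?_set]
  by_cases h : i = a
  · subst h; simp [hi]
  · simp [if_neg h, if_neg (fun hh : a = i => h hh.symm)]

-- ---------- selected lists agree ----------
theorem sel_eq_aux : ∀ (edges : List (Int × Int)) (config : List Int),
    config.length = edges.length →
    ((List.range edges.length).filter (fun k => config.getD k 0 == 1)).map
        (fun k => edges.getD k ((0 : Int), (0 : Int)))
      = ((edges.zip config).filter (fun ec => ec.2 == 1)).map Prod.fst := by
  intro edges
  induction edges with
  | nil => intro config h; simp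
  | cons e t ih =>
    intro config h
    cases config with
    | nil => simp at h
    | cons c ct =>
      simp only [List.length_cons] at h
      have h' : ct.length = t.length := by omega
      have key : ∀ (l : List Nat),
          (((l.map Nat.succ).filter (fun k => (c :: ct).getD k 0 == 1)).map
            (fun k => (e :: t).getD k ((0 : Int), (0 : Int))))
          = ((l.filter (fun k => ct.getD k 0 == 1)).map
              (fun k => t.getD k ((0 : Int), (0 : Int)))) := by
        intro l
        rw [List.filter_map, List.map_map]
        simp [Function.comp_def]
      rw [show (e :: t).length = t.length + 1 from rfl, List.range_succ_eq_map]
      rw [List.zip_cons_cons, List.filter_cons, List.filter_cons]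
      have hcond1 : (((c :: ct).getD 0 0 : Int) == 1) = (c == 1) := rfl
      have hcond2 : ((((e, c) : (Int × Int) × Int).2 : Int) == 1) = (c == 1) := rfl
      rw [hcond1, hcond2]
      by_cases hc : (c == 1) = true
      · rw [if_pos hc, if_pos hc, List.map_cons, List.map_cons,
          key (List.range t.length), ih ct h']
        rfl
      · rw [if_neg hc, if_neg hc, key (List.range t.length), ih ct h']

theorem sel_eq (edges : List (Int × Int)) (config : List Int)
    (h : config.length = edges.length) : pvSelA edges config = pvSelB edges config := by
  unfold pvSelA pvSelB
  simp only [PySem.List.len_eq, PySem.List.pyRange_one, Int.sub_zero, Int.toNat_natCast]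
  rw [List.filter_map, List.map_map]
  simp only [Function.comp_def, zero_add, PySem.List.pyGetD_natCast]
  exact sel_eq_aux edges config h

-- ---------- degree lists agree ----------
theorem deg_eq_aux : ∀ (sel : List (Int × Int)) (da : List Int × List (List Int)),
    (sel.foldl pvDegAdjStep da).1 = sel.foldl pvDegStep da.1 := by
  intro sel
  induction sel with
  | nil => intro da; rfl
  | cons uv t ih =>
    intro da
    rw [List.foldl_cons, List.foldl_cons, ih]
    rfl

theorem deg_eq (n : Nat) (sel : List (Int × Int)) : (pvDegAdj n sel).1 = pvDeg n sel :=
  deg_eq_aux sel _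

-- ---------- adjacency-list characterisation ----------
theorem adjStep_mem (N : Nat) (da : List Int × List (List Int)) (hlen : da.2.length = N)
    (uv : Int × Int) (h1 : InR N uv.1) (h2 : InR N uv.2) (a : Nat) (w : Int) :
    w ∈ (pvDegAdjStep da uv).2.getD a [] ↔
      w ∈ da.2.getD a [] ∨ (wI N uv.1 = a ∧ w = uv.2) ∨ (wI N uv.2 = a ∧ w = uv.1) := by
  have l1 : InR da.2.length uv.1 := by rw [hlen]; exact h1
  have e1 : (pvDegAdjStep da uv).2
      = PySem.List.pySetD (da.2.set (wI N uv.1) (da.2.getD (wI N uv.1) [] ++ [uv.2])) uv.2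
          (PySem.List.pyGetD (da.2.set (wI N uv.1) (da.2.getD (wI N uv.1) [] ++ [uv.2])) uv.2 [] ++ [uv.1]) := by
    simp only [pvDegAdjStep]
    rw [pySetD_in _ _ _ l1, pyGetD_in _ _ _ l1, hlen]
  set A1 := da.2.set (wI N uv.1) (da.2.getD (wI N uv.1) [] ++ [uv.2]) with hA1
  have lenA1 : A1.length = N := by rw [hA1, List.length_set, hlen]
  have l2 : InR A1.length uv.2 := by rw [lenA1]; exact h2
  have e2 : (pvDegAdjStep da uv).2 = A1.set (wI N uv.2) (A1.getD (wI N uv.2) [] ++ [uv.1]) := by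
    rw [e1, pySetD_in _ _ _ l2, pyGetD_in _ _ _ l2, lenA1]
  rw [e2]
  have hlt1 : wI N uv.1 < da.2.length := by rw [hlen]; exact wI_lt N uv.1 h1
  have hlt2 : wI N uv.2 < A1.length := by rw [lenA1]; exact wI_lt N uv.2 h2
  rw [getD_set' A1 (wI N uv.2) _ [] hlt2 a]
  by_cases ha2 : a = wI N uv.2
  · subst ha2
    rw [if_pos rfl, hA1, getD_set' da.2 (wI N uv.1) _ [] hlt1 (wI N uv.2)]
    by_cases ha1 : wI N uv.2 = wI N uv.1
    · rw [if_pos ha1, ← ha1]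
      simp only [List.mem_append, List.mem_singleton]
      tauto
    · rw [if_neg ha1]
      have hne : wI N uv.1 ≠ wI N uv.2 := fun hh => ha1 hh.symm
      simp only [List.mem_append, List.mem_singleton]
      tauto
  · rw [if_neg ha2, hA1, getD_set' da.2 (wI N uv.1) _ [] hlt1 a]
    by_cases ha1 : a = wI N uv.1
    · subst ha1
      rw [if_pos rfl]
      have hne : wI N uv.2 ≠ wI N uv.1 := fun hh => ha2 hh.symm
      simp only [List.mem_append, List.mem_singleton]
      tauto
    · rw [if_neg ha1]
      have hne1 : wI N uv.1 ≠ a := fun hh => ha1 hh.symm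
      have hne2 : wI N uv.2 ≠ a := fun hh => ha2 hh.symm
      tauto

theorem adj_fold_mem (N : Nat) : ∀ (sel : List (Int × Int)),
    (∀ uv ∈ sel, InR N uv.1 ∧ InR N uv.2) →
    ∀ (da : List Int × List (List Int)), da.2.length = N → ∀ (a : Nat) (w : Int),
      (w ∈ (sel.foldl pvDegAdjStep da).2.getD a [] ↔
        w ∈ da.2.getD a [] ∨ ∃ uv ∈ sel, (wI N uv.1 = a ∧ w = uv.2) ∨ (wI N uv.2 = a ∧ w = uv.1)) := by
  intro sel
  induction sel with
  | nil => intro _ da _ a w; simp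
  | cons uv t ih =>
    intro HS da hlen a w
    obtain ⟨h1, h2⟩ := HS uv (List.mem_cons_self)
    have hlen' : (pvDegAdjStep da uv).2.length = N := by
      simp [pvDegAdjStep, PySem.List.length_pySetD, hlen]
    rw [List.foldl_cons, ih (fun x hx => HS x (List.mem_cons_of_mem _ hx)) _ hlen' a w,
      adjStep_mem N da hlen uv h1 h2 a w]
    constructor
    · rintro ((hw | hw | hw) | ⟨x, hx, hxx⟩)
      · exact Or.inl hw
      · exact Or.inr ⟨uv, List.mem_cons_self, Or.inl hw⟩
      · exact Or.inr ⟨uv, List.mem_cons_self, Or.inr hw⟩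
      · exact Or.inr ⟨x, List.mem_cons_of_mem _ hx, hxx⟩
    · rintro (hw | ⟨x, hx, hxx⟩)
      · exact Or.inl (Or.inl hw)
      · rcases List.mem_cons.1 hx with hx0 | hx1
        · subst hx0; exact Or.inl (Or.inr hxx)
        · exact Or.inr ⟨x, hx1, hxx⟩

theorem adj_mem (N : Nat) (sel : List (Int × Int))
    (HS : ∀ uv ∈ sel, InR N uv.1 ∧ InR N uv.2) (a : Nat) (w : Int) :
    w ∈ (pvDegAdj N sel).2.getD a [] ↔
      ∃ uv ∈ sel, (wI N uv.1 = a ∧ w = uv.2) ∨ (wI N uv.2 = a ∧ w = uv.1) := by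
  have hbase : (List.replicate N ([] : List Int)).getD a [] = [] := by
    rcases Nat.lt_or_ge a N with h | h
    · rw [List.getD_eq_getElem _ _ (by simpa using h)]; simp
    · rw [List.getD_eq_default _ _ (by simpa using h)]
  rw [pvDegAdj, adj_fold_mem N sel HS _ (by simp) a w, hbase]
  simp

-- ---------- DFS loop invariants (port A) ----------
theorem pvInner_inv (adj : List (List Int)) (sel : List (Int × Int))
    (HA1 : ∀ (a : Nat) (w : Int), w ∈ adj.getD a [] →
      InR adj.length w ∧ pvStep sel adj.length a (wI adj.length w))
    (a0 : Nat) (hRa : pvReach sel adj.length a0) :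
    ∀ (nbrs : List Int), (∀ w ∈ nbrs, w ∈ adj.getD a0 []) →
    ∀ (v : List Bool) (s : List Int) (c : Int),
      v.length = adj.length → pvMk v 0 → c = (v.count true : Int) →
      (∀ x ∈ s, InR adj.length x ∧ pvMk v (wI adj.length x)) →
      (∀ a, pvMk v a → pvReach sel adj.length a) →
      (∀ a, pvMk v a → (∃ x ∈ s, wI adj.length x = a) ∨ a = a0 ∨
          ∀ w ∈ adj.getD a [], pvMk v (wI adj.length w)) →
      (pvDfsInner nbrs (v, s, c)).1.length = adj.length ∧
      pvMk (pvDfsInner nbrs (v, s, c)).1 0 ∧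
      (pvDfsInner nbrs (v, s, c)).2.2 = ((pvDfsInner nbrs (v, s, c)).1.count true : Int) ∧
      (∀ x ∈ (pvDfsInner nbrs (v, s, c)).2.1,
          InR adj.length x ∧ pvMk (pvDfsInner nbrs (v, s, c)).1 (wI adj.length x)) ∧
      (∀ a, pvMk (pvDfsInner nbrs (v, s, c)).1 a → pvReach sel adj.length a) ∧
      (∀ a, pvMk (pvDfsInner nbrs (v, s, c)).1 a →
          (∃ x ∈ (pvDfsInner nbrs (v, s, c)).2.1, wI adj.length x = a) ∨ a = a0 ∨
          ∀ w ∈ adj.getD a [], pvMk (pvDfsInner nbrs (v, s, c)).1 (wI adj.length w)) ∧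
      (∀ w ∈ nbrs, pvMk (pvDfsInner nbrs (v, s, c)).1 (wI adj.length w)) ∧
      (∀ a, pvMk v a → pvMk (pvDfsInner nbrs (v, s, c)).1 a) := by
  intro nbrs
  induction nbrs with
  | nil =>
    intro _ v s c hlen hm0 hc hst hsnd hQ
    exact ⟨hlen, hm0, hc, hst, hsnd, hQ, by simp, fun a ha => ha⟩
  | cons w t ih =>
    intro hnb v s c hlen hm0 hc hst hsnd hQ
    have hw : w ∈ adj.getD a0 [] := hnb w List.mem_cons_self
    obtain ⟨hwIn, hwStep⟩ := HA1 a0 w hw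
    have hwInv : InR v.length w := by rw [hlen]; exact hwIn
    have hstep : pvDfsInner (w :: t) (v, s, c)
        = pvDfsInner t (if PySem.List.pyGetD v w false then (v, s, c)
            else (PySem.List.pySetD v w true, w :: s, c + 1)) := rfl
    have hlt : wI v.length w < v.length := wI_lt _ _ hwInv
    have hlenN : wI v.length w = wI adj.length w := by rw [hlen]
    have hgetd := pyGetD_in v w false hwInv
    by_cases hg : PySem.List.pyGetD v w false = true
    · rw [hstep, if_pos hg]
      have hmkw : pvMk v (wI adj.length w) := by
        rw [pvMk, ← hlenN, ← hgetd]; exact hg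
      obtain ⟨l1, l2, l3, l4, l5, l6, l7, l8⟩ :=
        ih (fun x hx => hnb x (List.mem_cons_of_mem _ hx)) v s c hlen hm0 hc hst hsnd hQ
      refine ⟨l1, l2, l3, l4, l5, l6, ?_, l8⟩
      intro w' hw'
      rcases List.mem_cons.1 hw' with rfl | hw't
      · exact l8 _ hmkw
      · exact l7 w' hw't
    · have hgf : PySem.List.pyGetD v w false = false := by
        cases hgg : PySem.List.pyGetD v w false
        · rfl
        · exact absurd hgg hg
      rw [hstep, if_neg hg]
      have hv' : PySem.List.pySetD v w true = v.set (wI v.length w) true := pySetD_in v w true hwInv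
      have hfalse : v[wI v.length w] = false := by
        rw [hgf] at hgetd
        rw [List.getD_eq_getElem _ _ hlt] at hgetd
        exact hgetd.symm
      have hmkiff : ∀ a, pvMk (PySem.List.pySetD v w true) a ↔ a = wI adj.length w ∨ pvMk v a := by
        intro a; rw [hv', ← hlenN]; exact pvMk_set_iff v _ a hlt
      have hmono : ∀ a, pvMk v a → pvMk (PySem.List.pySetD v w true) a :=
        fun a ha => (hmkiff a).2 (Or.inr ha)
      have hlen' : (PySem.List.pySetD v w true).length = adj.length := by
        rw [PySem.List.length_pySetD]; exact hlen
      have hc' : c + 1 = ((PySem.List.pySetD v w true).count true : Int) := by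
        rw [hv', count_true_set v _ hlt hfalse, hc]
        push_cast; ring
      have hst' : ∀ x ∈ w :: s,
          InR adj.length x ∧ pvMk (PySem.List.pySetD v w true) (wI adj.length x) := by
        intro x hx
        rcases List.mem_cons.1 hx with rfl | hxs
        · exact ⟨hwIn, (hmkiff _).2 (Or.inl rfl)⟩
        · obtain ⟨hi, hm⟩ := hst x hxs
          exact ⟨hi, hmono _ hm⟩
      have hsnd' : ∀ a, pvMk (PySem.List.pySetD v w true) a → pvReach sel adj.length a := by
        intro a ha
        rcases (hmkiff a).1 ha with rfl | hold
        · exact hRa.tail hwStep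
        · exact hsnd a hold
      have hQ' : ∀ a, pvMk (PySem.List.pySetD v w true) a →
          (∃ x ∈ w :: s, wI adj.length x = a) ∨ a = a0 ∨
          ∀ w' ∈ adj.getD a [], pvMk (PySem.List.pySetD v w true) (wI adj.length w') := by
        intro a ha
        rcases (hmkiff a).1 ha with rfl | hold
        · exact Or.inl ⟨w, List.mem_cons_self, rfl⟩
        · rcases hQ a hold with ⟨x, hxs, hxa⟩ | h0 | hcl
          · exact Or.inl ⟨x, List.mem_cons_of_mem _ hxs, hxa⟩
          · exact Or.inr (Or.inl h0)
          · exact Or.inr (Or.inr (fun w' hw' => hmono _ (hcl w' hw')))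
      obtain ⟨l1, l2, l3, l4, l5, l6, l7, l8⟩ :=
        ih (fun x hx => hnb x (List.mem_cons_of_mem _ hx)) (PySem.List.pySetD v w true)
          (w :: s) (c + 1) hlen' ((hmkiff 0).2 (Or.inr hm0)) hc' hst' hsnd' hQ'
      refine ⟨l1, l2, l3, l4, l5, l6, ?_, fun a ha => l8 a (hmono a ha)⟩
      intro w' hw'
      rcases List.mem_cons.1 hw' with rfl | hw't
      · exact l8 _ ((hmkiff _).2 (Or.inl rfl))
      · exact l7 w' hw't

theorem pvDfs_inv (adj : List (List Int)) (sel : List (Int × Int))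
    (HA1 : ∀ (a : Nat) (w : Int), w ∈ adj.getD a [] →
      InR adj.length w ∧ pvStep sel adj.length a (wI adj.length w)) :
    ∀ (v : List Bool) (s : List Int) (c : Int) (hv : v.length = adj.length),
      pvMk v 0 → c = (v.count true : Int) →
      (∀ x ∈ s, InR adj.length x ∧ pvMk v (wI adj.length x)) →
      (∀ a, pvMk v a → pvReach sel adj.length a) →
      (∀ a, pvMk v a → (∃ x ∈ s, wI adj.length x = a) ∨
          ∀ w ∈ adj.getD a [], pvMk v (wI adj.length w)) →
      (pvDfs adj v s c hv).1.length = adj.length ∧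
      pvMk (pvDfs adj v s c hv).1 0 ∧
      (pvDfs adj v s c hv).2 = ((pvDfs adj v s c hv).1.count true : Int) ∧
      (∀ a, pvMk (pvDfs adj v s c hv).1 a → pvReach sel adj.length a) ∧
      (∀ a, pvMk (pvDfs adj v s c hv).1 a →
          ∀ w ∈ adj.getD a [], pvMk (pvDfs adj v s c hv).1 (wI adj.length w)) := by
  intro v s c hv
  fun_induction pvDfs adj v s c hv with
  | case1 v c hv =>
    intro hm0 hc hst hsnd hQ
    refine ⟨hv, hm0, hc, hsnd, ?_⟩
    intro a ha
    rcases hQ a ha with ⟨x, hx, _⟩ | hcl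
    · exact absurd hx (List.not_mem_nil)
    · exact hcl
  | case2 v c hv cur rest ih =>
    intro hm0 hc hst hsnd hQ
    obtain ⟨hcurIn, hcurMk⟩ := hst cur List.mem_cons_self
    have hRa : pvReach sel adj.length (wI adj.length cur) := hsnd _ hcurMk
    have hcurInv : InR adj.length cur := hcurIn
    have hnbrs : PySem.List.pyGetD adj cur [] = adj.getD (wI adj.length cur) [] :=
      pyGetD_in adj cur [] hcurInv
    have hQ' : ∀ a, pvMk v a → (∃ x ∈ rest, wI adj.length x = a) ∨ a = wI adj.length cur ∨
        ∀ w ∈ adj.getD a [], pvMk v (wI adj.length w) := by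
      intro a ha
      rcases hQ a ha with ⟨x, hx, hxa⟩ | hcl
      · rcases List.mem_cons.1 hx with rfl | hxs
        · exact Or.inr (Or.inl hxa.symm)
        · exact Or.inl ⟨x, hxs, hxa⟩
      · exact Or.inr (Or.inr hcl)
    obtain ⟨l1, l2, l3, l4, l5, l6, l7, l8⟩ :=
      pvInner_inv adj sel HA1 (wI adj.length cur) hRa (PySem.List.pyGetD adj cur [])
        (fun w hw => by rwa [hnbrs] at hw) v rest c hv hm0 hc
        (fun x hx => hst x (List.mem_cons_of_mem _ hx)) hsnd hQ'
    apply ih l2 l3 l4 l5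
    intro a ha
    rcases l6 a ha with hstk | h0 | hcl
    · exact Or.inl hstk
    · subst h0
      refine Or.inr ?_
      intro w hw
      exact l7 w (by rwa [hnbrs])
    · exact Or.inr hcl

-- ---------- from closure to reachability ----------
theorem marked_of_reach (sel : List (Int × Int)) (N : Nat) (r : List Bool)
    (m0 : pvMk r 0)
    (closed : ∀ a b, pvStep sel N a b → pvMk r a → pvMk r b) :
    ∀ a, pvReach sel N a → pvMk r a := by
  intro a h
  induction h with
  | refl => exact m0
  | tail _ hbc ih => exact closed _ _ hbc ih

theorem mk_all (r : List Bool) : (∀ x ∈ r, x = true) ↔ ∀ a, a < r.length → pvMk r a := by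
  constructor
  · intro h a ha
    rw [pvMk, List.getD_eq_getElem _ _ ha]
    exact h _ (r.getElem_mem ha)
  · intro h x hx
    obtain ⟨i, hi, rfl⟩ := List.mem_iff_getElem.1 hx
    have := h i hi
    rwa [pvMk, List.getD_eq_getElem _ _ hi] at this

theorem not_mk_replicate (N : Nat) (a : Nat) : ¬ pvMk (List.replicate N false) a := by
  intro h
  have ha := pvMk_lt _ _ h
  rw [pvMk, List.getD_eq_getElem _ _ ha] at h
  simp at h

-- ---------- port A: the DFS answer decides connectivity ----------
theorem A_result (sel : List (Int × Int)) (n : Int) (hn : 1 ≤ n)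
    (HS : ∀ uv ∈ sel, InR n.toNat uv.1 ∧ InR n.toNat uv.2)
    (hv : (PySem.List.pySetD (List.replicate n.toNat false) 0 true).length
      = (pvDegAdj n.toNat sel).2.length) :
    ((pvDfs (pvDegAdj n.toNat sel).2 (PySem.List.pySetD (List.replicate n.toNat false) 0 true)
        [0] 1 hv).2 == n) = true
      ↔ (∀ a, a < n.toNat → pvReach sel n.toNat a) := by
  have hN : 0 < n.toNat := by omega
  have adjL : (pvDegAdj n.toNat sel).2.length = n.toNat := pvDegAdj_adj_len n.toNat sel
  have hin0 : InR (List.replicate (n.toNat) false).length (0 : Int) := by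
    constructor <;> simp [List.length_replicate] <;> omega
  have hwI0 : wI (List.replicate (n.toNat) false).length (0 : Int) = 0 := by simp [wI]
  have hv0 : PySem.List.pySetD (List.replicate n.toNat false) 0 true
      = (List.replicate n.toNat false).set 0 true := by
    rw [pySetD_in _ _ _ hin0, hwI0]
  have hlen0 : ((List.replicate n.toNat false).set 0 true).length = n.toNat := by simp
  have hrep0 : (List.replicate n.toNat false)[0]'(by simpa using hN) = false := by simp
  have hmk0 : pvMk ((List.replicate n.toNat false).set 0 true) 0 :=
    pvMk_set_self _ 0 (by simpa using hN)
  have hmkiff0 : ∀ a, pvMk ((List.replicate n.toNat false).set 0 true) a ↔ a = 0 := by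
    intro a
    rw [pvMk_set_iff _ _ _ (by simpa using hN)]
    constructor
    · rintro (h | h)
      · exact h
      · exact absurd h (not_mk_replicate _ _)
    · exact fun h => Or.inl h
  have hcnt0 : (1 : Int) = (((List.replicate n.toNat false).set 0 true).count true : Int) := by
    rw [count_true_set _ _ (by simpa using hN) hrep0]
    rw [List.count_replicate]
    simp
  have HA1 : ∀ (a : Nat) (w : Int), w ∈ (pvDegAdj n.toNat sel).2.getD a [] →
      InR (pvDegAdj n.toNat sel).2.length w ∧
      pvStep sel (pvDegAdj n.toNat sel).2.length a (wI (pvDegAdj n.toNat sel).2.length w) := by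
    intro a w hw
    rw [adjL]
    obtain ⟨uv, huv, hcase⟩ := (adj_mem n.toNat sel HS a w).1 hw
    rcases hcase with ⟨h1, h2⟩ | ⟨h1, h2⟩
    · exact ⟨by rw [h2]; exact (HS uv huv).2, ⟨uv, huv, Or.inl ⟨h1, by rw [h2]⟩⟩⟩
    · exact ⟨by rw [h2]; exact (HS uv huv).1, ⟨uv, huv, Or.inr ⟨by rw [h2], h1⟩⟩⟩
  obtain ⟨l1, l2, l3, l4, l5⟩ := pvDfs_inv (pvDegAdj n.toNat sel).2 sel HA1
    (PySem.List.pySetD (List.replicate n.toNat false) 0 true) [0] 1 hv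
    (by rw [hv0]; exact hmk0)
    (by rw [hv0]; exact hcnt0)
    (by
      intro x hx
      rcases List.mem_cons.1 hx with rfl | hx0
      · refine ⟨by rw [adjL]; constructor <;> omega, ?_⟩
        have : wI (pvDegAdj n.toNat sel).2.length (0 : Int) = 0 := by simp [wI]
        rw [this, hv0]; exact hmk0
      · exact absurd hx0 (List.not_mem_nil))
    (by
      intro a ha
      rw [hv0] at ha
      rw [(hmkiff0 a).1 ha]
      exact Relation.ReflTransGen.refl)
    (by
      intro a ha
      rw [hv0] at ha
      rw [(hmkiff0 a).1 ha]
      refine Or.inl ⟨0, List.mem_cons_self, by simp [wI]⟩)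
  rw [adjL] at l1 l4 l5
  set r := pvDfs (pvDegAdj n.toNat sel).2
    (PySem.List.pySetD (List.replicate n.toNat false) 0 true) [0] 1 hv with hr
  have m0' : pvMk r.1 0 := l2
  have closed' : ∀ a b, pvStep sel n.toNat a b → pvMk r.1 a → pvMk r.1 b := by
    intro a b hst hmk
    obtain ⟨uv, huv, hcase⟩ := hst
    rcases hcase with ⟨h1, h2⟩ | ⟨h1, h2⟩
    · have hwmem : uv.2 ∈ (pvDegAdj n.toNat sel).2.getD a [] :=
        (adj_mem n.toNat sel HS a uv.2).2 ⟨uv, huv, Or.inl ⟨h1, rfl⟩⟩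
      have := l5 a hmk uv.2 hwmem
      rwa [h2] at this
    · have hwmem : uv.1 ∈ (pvDegAdj n.toNat sel).2.getD a [] :=
        (adj_mem n.toNat sel HS a uv.1).2 ⟨uv, huv, Or.inr ⟨h2, rfl⟩⟩
      have := l5 a hmk uv.1 hwmem
      rwa [h1] at this
  have hNn : ((n.toNat : Nat) : Int) = n := Int.toNat_of_nonneg (by omega)
  rw [beq_iff_eq, l3]
  constructor
  · intro h a haN
    have hcount : r.1.count true = n.toNat := by omega
    have hall : ∀ b ∈ r.1, true = b :=
      List.count_eq_length.1 (by rw [hcount, l1])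
    exact l4 a ((mk_all r.1).1 (fun x hx => (hall x hx).symm) a (by omega))
  · intro h
    have hmkall : ∀ a, a < n.toNat → pvMk r.1 a :=
      fun a ha => marked_of_reach sel n.toNat r.1 m0' closed' a (h a ha)
    have hcount : r.1.count true = r.1.length :=
      List.count_eq_length.2 (fun b hb =>
        ((mk_all r.1).2 (fun a ha => hmkall a (by omega)) b hb).symm)
    rw [hcount, l1]
    exact hNn

-- ---------- relaxation loop invariants (port B) ----------
def pvPassF (vc : List Bool × Bool) (uv : Int × Int) : List Bool × Bool :=
  if PySem.List.pyGetD vc.1 uv.1 false != PySem.List.pyGetD vc.1 uv.2 false then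
    (PySem.List.pySetD (PySem.List.pySetD vc.1 uv.1 true) uv.2 true, true)
  else vc

theorem pvPass_eq (sel : List (Int × Int)) (v : List Bool) :
    pvPass sel v = sel.foldl pvPassF (v, false) := rfl

theorem passF_len : ∀ (sel : List (Int × Int)) (vc : List Bool × Bool),
    (sel.foldl pvPassF vc).1.length = vc.1.length := by
  intro sel
  induction sel with
  | nil => intro vc; rfl
  | cons uv t ih =>
    intro vc
    rw [List.foldl_cons, ih]
    simp only [pvPassF]
    split_ifs <;> simp [PySem.List.length_pySetD]

theorem passF_mono : ∀ (sel : List (Int × Int)) (vc : List Bool × Bool) (a : Nat),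
    pvMk vc.1 a → pvMk (sel.foldl pvPassF vc).1 a := by
  intro sel
  induction sel with
  | nil => intro vc a h; exact h
  | cons uv t ih =>
    intro vc a h
    rw [List.foldl_cons]
    apply ih
    simp only [pvPassF]
    split_ifs
    · exact pvMk_pySetD_mono _ _ _ (pvMk_pySetD_mono _ _ _ h)
    · exact h

theorem passF_count_le : ∀ (sel : List (Int × Int)) (vc : List Bool × Bool),
    (sel.foldl pvPassF vc).1.count false ≤ vc.1.count false := by
  intro sel
  induction sel with
  | nil => intro vc; exact le_refl _
  | cons uv t ih =>
    intro vc
    rw [List.foldl_cons]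
    refine le_trans (ih _) ?_
    simp only [pvPassF]
    split_ifs
    · exact le_trans (count_false_pySetD_le _ _) (count_false_pySetD_le _ _)
    · exact le_refl _

theorem passF_snd_true : ∀ (sel : List (Int × Int)) (vc : List Bool × Bool),
    vc.2 = true → (sel.foldl pvPassF vc).2 = true := by
  intro sel
  induction sel with
  | nil => intro vc h; exact h
  | cons uv t ih =>
    intro vc h
    rw [List.foldl_cons]
    apply ih
    simp only [pvPassF]
    split_ifs
    · rfl
    · exact h

theorem passF_fix : ∀ (sel : List (Int × Int)) (v : List Bool),
    (sel.foldl pvPassF (v, false)).2 = false →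
    (sel.foldl pvPassF (v, false)).1 = v ∧
    ∀ uv ∈ sel, PySem.List.pyGetD v uv.1 false = PySem.List.pyGetD v uv.2 false := by
  intro sel
  induction sel with
  | nil => intro v _; exact ⟨rfl, by simp⟩
  | cons uv t ih =>
    intro v h
    rw [List.foldl_cons] at h ⊢
    by_cases hg : (PySem.List.pyGetD v uv.1 false != PySem.List.pyGetD v uv.2 false) = true
    · exfalso
      have : pvPassF (v, false) uv
          = (PySem.List.pySetD (PySem.List.pySetD v uv.1 true) uv.2 true, true) := by
        simp only [pvPassF]; rw [if_pos hg]
      rw [this] at h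
      rw [passF_snd_true t _ rfl] at h
      exact absurd h (by simp)
    · have heq : PySem.List.pyGetD v uv.1 false = PySem.List.pyGetD v uv.2 false := by
        simpa using hg
      have : pvPassF (v, false) uv = (v, false) := by
        simp only [pvPassF]; rw [if_neg hg]
      rw [this] at h ⊢
      obtain ⟨h1, h2⟩ := ih v h
      refine ⟨h1, ?_⟩
      intro x hx
      rcases List.mem_cons.1 hx with rfl | hxt
      · exact heq
      · exact h2 x hxt

theorem passF_sound (S0 : List (Int × Int)) (N : Nat)
    (HS : ∀ uv ∈ S0, InR N uv.1 ∧ InR N uv.2) :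
    ∀ (sel : List (Int × Int)), (∀ uv ∈ sel, uv ∈ S0) →
    ∀ (vc : List Bool × Bool), vc.1.length = N →
      (∀ a, pvMk vc.1 a → pvReach S0 N a) →
      ∀ a, pvMk (sel.foldl pvPassF vc).1 a → pvReach S0 N a := by
  intro sel
  induction sel with
  | nil => intro _ vc _ hsnd a ha; exact hsnd a ha
  | cons uv t ih =>
    intro hsub vc hlen hsnd
    rw [List.foldl_cons]
    obtain ⟨hu, hw⟩ := HS uv (hsub uv List.mem_cons_self)
    have huv : InR vc.1.length uv.1 := by rw [hlen]; exact hu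
    have hwv : InR vc.1.length uv.2 := by rw [hlen]; exact hw
    by_cases hg : (PySem.List.pyGetD vc.1 uv.1 false != PySem.List.pyGetD vc.1 uv.2 false) = true
    · have hne : PySem.List.pyGetD vc.1 uv.1 false ≠ PySem.List.pyGetD vc.1 uv.2 false := by
        simpa using hg
      have hstep : pvPassF vc uv
          = (PySem.List.pySetD (PySem.List.pySetD vc.1 uv.1 true) uv.2 true, true) := by
        simp only [pvPassF]; rw [if_pos hg]
      rw [hstep]
      have hset1 : PySem.List.pySetD vc.1 uv.1 true = vc.1.set (wI vc.1.length uv.1) true :=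
        pySetD_in _ _ _ huv
      have hlen1 : (PySem.List.pySetD vc.1 uv.1 true).length = vc.1.length := by
        rw [PySem.List.length_pySetD]
      have hwv1 : InR (PySem.List.pySetD vc.1 uv.1 true).length uv.2 := by rw [hlen1]; exact hwv
      have hset2 : PySem.List.pySetD (PySem.List.pySetD vc.1 uv.1 true) uv.2 true
          = (PySem.List.pySetD vc.1 uv.1 true).set (wI vc.1.length uv.2) true := by
        rw [pySetD_in _ _ _ hwv1, hlen1]
      have hlt1 : wI vc.1.length uv.1 < vc.1.length := wI_lt _ _ huv
      have hlt2 : wI vc.1.length uv.2 < (PySem.List.pySetD vc.1 uv.1 true).length := by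
        rw [hlen1]; exact wI_lt _ _ hwv
      have hStep : pvStep S0 N (wI N uv.1) (wI N uv.2) :=
        ⟨uv, hsub uv List.mem_cons_self, Or.inl ⟨rfl, rfl⟩⟩
      have hwIN1 : wI vc.1.length uv.1 = wI N uv.1 := by rw [hlen]
      have hwIN2 : wI vc.1.length uv.2 = wI N uv.2 := by rw [hlen]
      have hg1 := pyGetD_in vc.1 uv.1 false huv
      have hg2 := pyGetD_in vc.1 uv.2 false hwv
      have hR12 : pvReach S0 N (wI N uv.1) ∧ pvReach S0 N (wI N uv.2) := by
        cases hb1 : PySem.List.pyGetD vc.1 uv.1 false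
        · -- endpoint 1 unmarked, so endpoint 2 is marked
          have hb2 : PySem.List.pyGetD vc.1 uv.2 false = true := by
            cases hb2 : PySem.List.pyGetD vc.1 uv.2 false
            · rw [hb1, hb2] at hne; exact absurd rfl hne
            · rfl
          have hmk2 : pvMk vc.1 (wI N uv.2) := by
            rw [pvMk, ← hwIN2, ← hg2]; exact hb2
          have hr2 := hsnd _ hmk2
          exact ⟨hr2.tail ⟨uv, hsub uv List.mem_cons_self, Or.inr ⟨rfl, rfl⟩⟩, hr2⟩
        · have hmk1 : pvMk vc.1 (wI N uv.1) := by
            rw [pvMk, ← hwIN1, ← hg1]; exact hb1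
          have hr1 := hsnd _ hmk1
          exact ⟨hr1, hr1.tail hStep⟩
      apply ih (fun x hx => hsub x (List.mem_cons_of_mem _ hx))
      · rw [PySem.List.length_pySetD, PySem.List.length_pySetD]; exact hlen
      · intro a ha
        rw [hset2] at ha
        rcases (pvMk_set_iff _ _ _ hlt2).1 ha with rfl | ha1
        · exact hwIN2 ▸ hR12.2
        · rw [hset1] at ha1
          rcases (pvMk_set_iff _ _ _ hlt1).1 ha1 with rfl | ha2
          · exact hwIN1 ▸ hR12.1
          · exact hsnd a ha2
    · have hstep : pvPassF vc uv = vc := by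
        simp only [pvPassF]; rw [if_neg hg]
      rw [hstep]
      exact ih (fun x hx => hsub x (List.mem_cons_of_mem _ hx)) vc hlen hsnd

theorem relax_step_strict (v : List Bool) (u w : Int)
    (hu : InR v.length u) (hw : InR v.length w)
    (hne : PySem.List.pyGetD v u false ≠ PySem.List.pyGetD v w false) :
    (PySem.List.pySetD (PySem.List.pySetD v u true) w true).count false < v.count false := by
  have hlt1 : wI v.length u < v.length := wI_lt _ _ hu
  have hlt2 : wI v.length w < v.length := wI_lt _ _ hw
  have hg1 := pyGetD_in v u false hu
  have hg2 := pyGetD_in v w false hw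
  have hneD : v.getD (wI v.length u) false ≠ v.getD (wI v.length w) false := by
    rw [hg1, hg2] at hne; exact hne
  have hij : wI v.length u ≠ wI v.length w := by
    intro hh
    exact hneD (by rw [hh])
  have hset1 : PySem.List.pySetD v u true = v.set (wI v.length u) true := pySetD_in _ _ _ hu
  have hlen1 : (v.set (wI v.length u) true).length = v.length := by simp
  have hset2 : PySem.List.pySetD (v.set (wI v.length u) true) w true
      = (v.set (wI v.length u) true).set (wI v.length w) true := by
    rw [pySetD_in _ _ _ (by rw [hlen1]; exact hw), hlen1]
  rw [hset1, hset2]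
  cases hb1 : v[wI v.length u]
  · -- u's slot flips
    have hc1 : (v.set (wI v.length u) true).count false + 1 = v.count false :=
      count_false_set v _ hlt1 hb1
    have hc2 : ((v.set (wI v.length u) true).set (wI v.length w) true).count false
        ≤ (v.set (wI v.length u) true).count false := count_false_set_le _ _
    omega
  · -- u's slot was already true, so w's slot is false and flips
    have hb2 : v[wI v.length w] = false := by
      have h1 : v.getD (wI v.length u) false = true := by
        rw [List.getD_eq_getElem _ _ hlt1, hb1]
      have h2 : v.getD (wI v.length w) false = v[wI v.length w] :=
        List.getD_eq_getElem _ _ hlt2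
      cases hb2 : v[wI v.length w]
      · rfl
      · exfalso; apply hneD; rw [h1, h2, hb2]
    have hid : v.set (wI v.length u) true = v := by
      conv_lhs => rw [← hb1]
      exact List.set_getElem_self hlt1
    rw [hid]
    have := count_false_set v _ hlt2 hb2
    omega

theorem passF_strict (S0 : List (Int × Int)) (N : Nat)
    (HS : ∀ uv ∈ S0, InR N uv.1 ∧ InR N uv.2) :
    ∀ (sel : List (Int × Int)), (∀ uv ∈ sel, uv ∈ S0) →
    ∀ (v : List Bool), v.length = N →
      (sel.foldl pvPassF (v, false)).2 = true →
      (sel.foldl pvPassF (v, false)).1.count false < v.count false := by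
  intro sel
  induction sel with
  | nil => intro _ v _ h; exact absurd h (by simp [List.foldl_nil])
  | cons uv t ih =>
    intro hsub v hlen h
    rw [List.foldl_cons] at h ⊢
    obtain ⟨hu, hw⟩ := HS uv (hsub uv List.mem_cons_self)
    by_cases hg : (PySem.List.pyGetD v uv.1 false != PySem.List.pyGetD v uv.2 false) = true
    · have hstep : pvPassF (v, false) uv
          = (PySem.List.pySetD (PySem.List.pySetD v uv.1 true) uv.2 true, true) := by
        simp only [pvPassF]; rw [if_pos hg]
      rw [hstep]
      refine lt_of_le_of_lt (passF_count_le t _) ?_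
      exact relax_step_strict v uv.1 uv.2 (by rw [hlen]; exact hu) (by rw [hlen]; exact hw)
        (by simpa using hg)
    · have hstep : pvPassF (v, false) uv = (v, false) := by
        simp only [pvPassF]; rw [if_neg hg]
      rw [hstep] at h ⊢
      exact ih (fun x hx => hsub x (List.mem_cons_of_mem _ hx)) v hlen h

theorem pvRelax_inv (S0 : List (Int × Int)) (N : Nat)
    (HS : ∀ uv ∈ S0, InR N uv.1 ∧ InR N uv.2) :
    ∀ (v : List Bool), v.length = N → pvMk v 0 →
      (∀ a, pvMk v a → pvReach S0 N a) →
      (pvRelax S0 v).length = N ∧ pvMk (pvRelax S0 v) 0 ∧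
      (∀ a, pvMk (pvRelax S0 v) a → pvReach S0 N a) ∧
      (∀ uv ∈ S0, pvMk (pvRelax S0 v) (wI N uv.1) ↔ pvMk (pvRelax S0 v) (wI N uv.2)) := by
  intro v
  fun_induction pvRelax S0 v with
  | case1 v h ih =>
    intro hlen hm0 hsnd
    exact ih (by rw [pvPass_eq, passF_len]; exact hlen)
      (by rw [pvPass_eq]; exact passF_mono S0 (v, false) 0 hm0)
      (by
        rw [pvPass_eq]
        exact passF_sound S0 N HS S0 (fun x hx => hx) (v, false) hlen hsnd)
  | case2 v h =>
    intro hlen hm0 hsnd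
    have hp2 : (pvPass S0 v).2 = false := by
      cases hp : (pvPass S0 v).2
      · rfl
      · exfalso
        apply h
        refine ⟨hp, ?_⟩
        rw [pvPass_eq] at hp ⊢
        exact passF_strict S0 N HS S0 (fun x hx => hx) v hlen hp
    obtain ⟨hfix, hbal⟩ := passF_fix S0 v (by rw [← pvPass_eq]; exact hp2)
    rw [← pvPass_eq] at hfix
    rw [hfix]
    refine ⟨hlen, hm0, hsnd, ?_⟩
    intro uv huv
    obtain ⟨hu, hw⟩ := HS uv huv
    have heq := hbal uv huv
    rw [pyGetD_in v uv.1 false (by rw [hlen]; exact hu),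
      pyGetD_in v uv.2 false (by rw [hlen]; exact hw), hlen] at heq
    rw [pvMk, pvMk, heq]

-- ---------- port B: the relaxation answer decides connectivity ----------
theorem B_result (S0 : List (Int × Int)) (n : Int) (hn : 1 ≤ n)
    (HS : ∀ uv ∈ S0, InR n.toNat uv.1 ∧ InR n.toNat uv.2) :
    ((pvRelax S0 (PySem.List.pySetD (List.replicate n.toNat false) 0 true)).all (fun b => b)) = true
      ↔ (∀ a, a < n.toNat → pvReach S0 n.toNat a) := by
  have hN : 0 < n.toNat := by omega
  have hin0 : InR (List.replicate (n.toNat) false).length (0 : Int) := by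
    constructor <;> simp [List.length_replicate] <;> omega
  have hv0 : PySem.List.pySetD (List.replicate n.toNat false) 0 true
      = (List.replicate n.toNat false).set 0 true := by
    rw [pySetD_in _ _ _ hin0]
    simp [wI]
  have hmkiff0 : ∀ a, pvMk ((List.replicate n.toNat false).set 0 true) a ↔ a = 0 := by
    intro a
    rw [pvMk_set_iff _ _ _ (by simpa using hN)]
    constructor
    · rintro (h | h)
      · exact h
      · exact absurd h (not_mk_replicate _ _)
    · exact fun h => Or.inl h
  obtain ⟨l1, l2, l3, l4⟩ := pvRelax_inv S0 n.toNat HS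
    (PySem.List.pySetD (List.replicate n.toNat false) 0 true)
    (by rw [hv0]; simp)
    (by rw [hv0]; exact pvMk_set_self _ 0 (by simpa using hN))
    (by
      intro a ha
      rw [hv0] at ha
      rw [(hmkiff0 a).1 ha]
      exact Relation.ReflTransGen.refl)
  set r := pvRelax S0 (PySem.List.pySetD (List.replicate n.toNat false) 0 true) with hr
  have closed' : ∀ a b, pvStep S0 n.toNat a b → pvMk r a → pvMk r b := by
    intro a b hst hmk
    obtain ⟨uv, huv, hcase⟩ := hst
    rcases hcase with ⟨h1, h2⟩ | ⟨h1, h2⟩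
    · rw [← h2, ← (l4 uv huv), h1]; exact hmk
    · rw [← h1, (l4 uv huv), h2]; exact hmk
  rw [List.all_eq_true]
  constructor
  · intro h a ha
    exact l3 a ((mk_all r).1 (fun x hx => h x hx) a (by omega))
  · intro h x hx
    exact (mk_all r).2
      (fun a ha => marked_of_reach S0 n.toNat r l2 closed' a (h a (by omega))) x hx

-- ---------- the two connectivity answers agree ----------
theorem conn_eq (sel : List (Int × Int)) (n : Int) (hn : 1 ≤ n)
    (HS : ∀ uv ∈ sel, InR n.toNat uv.1 ∧ InR n.toNat uv.2)
    (hv : (PySem.List.pySetD (List.replicate n.toNat false) 0 true).length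
      = (pvDegAdj n.toNat sel).2.length) :
    ((pvDfs (pvDegAdj n.toNat sel).2 (PySem.List.pySetD (List.replicate n.toNat false) 0 true)
        [0] 1 hv).2 == n)
      = (pvRelax sel (PySem.List.pySetD (List.replicate n.toNat false) 0 true)).all
          (fun b => b) :=
  Bool.coe_iff_coe.mp ((A_result sel n hn HS hv).trans (B_result sel n hn HS).symm)

-- ===== VERDICT (by name: the statement is the Claim_ definition above) =====
theorem adv_is_valid_dcst_spec : Claim_equal_adv_is_valid_dcst := by
  intro n edges config max_deg _hdom hpre
  unfold Spec_adv_is_valid_dcst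
  unfold adv_is_valid_dcst adv_is_valid_dcst_alt
  by_cases h0 : (n == 0) = true
  · rw [if_pos h0, if_pos h0]
  · rw [if_neg h0, if_neg h0]
    by_cases h1 : (PySem.List.len config != PySem.List.len edges) = true
    · rw [if_pos h1, if_pos h1]
    · rw [if_neg h1, if_neg h1]
      have hleneq : config.length = edges.length := by
        have h1' : PySem.List.len config = PySem.List.len edges := by
          simpa using h1
        rw [PySem.List.len_eq, PySem.List.len_eq] at h1'
        exact_mod_cast h1'
      have hsel := sel_eq edges config hleneq
      rw [← hsel]
      by_cases h2 : (PySem.List.len (pvSelA edges config) != n - 1) = true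
      · rw [if_pos h2, if_pos h2]
      · rw [if_neg h2, if_neg h2]
        rw [deg_eq]
        by_cases h3 : ((pvDeg n.toNat (pvSelA edges config)).any
            fun d => decide (d > max_deg)) = true
        · rw [if_pos h3, if_pos h3]
        · rw [if_neg h3, if_neg h3]
          have hlen3 : ((pvSelA edges config).length : Int) = n - 1 := by
            have h2' : PySem.List.len (pvSelA edges config) = n - 1 := by simpa using h2
            rwa [PySem.List.len_eq] at h2'
          have hn0 : n ≠ 0 := by simpa using h0
          have hn1 : 1 ≤ n := by
            have hnn : (0 : Int) ≤ ((pvSelA edges config).length : Int) := by positivity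
            omega
          have HS : ∀ uv ∈ pvSelA edges config, InR n.toNat uv.1 ∧ InR n.toNat uv.2 := by
            rw [hsel]
            rcases hpre with (hq | hq | hq) | hq
            · exact absurd hq hn0
            · exact absurd hleneq hq
            · exfalso
              apply hq
              have : (edges.zip config).countP (fun ec => ec.2 == 1)
                  = (pvSelB edges config).length := by
                rw [pvSelB, List.length_map, List.countP_eq_length_filter]
              rw [this, ← hsel]
              exact hlen3
            · intro uv huv
              obtain ⟨ec, hecmem, rfl⟩ := List.mem_map.1 huv
              obtain ⟨hzip, hec2⟩ := List.mem_filter.1 hecmem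
              obtain ⟨b1, b2, b3, b4⟩ := hq ec hzip (by simpa using hec2)
              constructor
              · constructor <;> omega
              · constructor <;> omega
          exact conn_eq (pvSelA edges config) n hn1 HS _
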